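-- pv_equiv track=rewrite | github.com/D3BAS1SH/Python-programs | CollegePrograms/MatrixModule.py | isMatrix
-- ===== SOURCE A (Python) =====
-- def isMatrix(A):
--
--     value=set([len(x) for x in A if isinstance(x,list)])
--
--     if(len(value)==1):
--         return True
--     return False
--
--     """ if(isinstance(A,list)):
--         theMats=[True for x in A if isinstance(x,list)]
--         if(theMats.count(True)==len(A)):
--             if len({len(x) for x in A})==1:
--                 return True
--             return False
--         return False
--     return False """
-- ===== SOURCE B (Python) =====
-- def isMatrix(A):
--     expected = None
--     for x in A:
--         if not isinstance(x, list):
--             continue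
--         if expected is None:
--             expected = len(x)
--         elif len(x) != expected:
--             return False
--     return expected is not None
-- ===== Notes on version B (the rewrite author's own statement) =====
-- stated objective: simpler
-- what changed: Replaces building a set of all row lengths and testing its cardinality with a single early-exit pass that keeps one expected length and returns False on the first mismatch.
import Mathlib
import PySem

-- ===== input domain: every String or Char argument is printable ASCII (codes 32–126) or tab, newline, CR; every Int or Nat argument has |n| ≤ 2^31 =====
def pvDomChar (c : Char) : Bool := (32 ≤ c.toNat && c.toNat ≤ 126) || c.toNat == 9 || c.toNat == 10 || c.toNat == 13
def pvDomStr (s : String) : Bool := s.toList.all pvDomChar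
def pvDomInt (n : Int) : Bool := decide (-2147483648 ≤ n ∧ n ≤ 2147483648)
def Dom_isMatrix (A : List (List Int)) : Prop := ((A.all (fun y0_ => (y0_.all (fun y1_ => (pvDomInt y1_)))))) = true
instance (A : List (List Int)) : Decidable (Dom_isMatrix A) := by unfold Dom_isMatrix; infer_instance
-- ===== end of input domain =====

-- B replaces A's set-of-lengths-then-cardinality check by a single early-exit pass keeping one expected length (objective: simpler).

-- ===== PORT A =====
-- value = set([len(x) for x in A if isinstance(x, list)]); under the type List (List Int)
-- every element is a list, so the isinstance filter admits everything.
def isMatrix (A : List (List Int)) : Bool :=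
  let value : PySem.Set Int := PySem.Set.ofList (A.map (fun x => (x.length : Int)))
  if value.length = 1 then true else false

-- ===== PORT B =====
-- expected = None; for x in A: first list row sets expected, later mismatch returns False; return expected is not None
def isMatrixAltGo (expected : Option Int) : List (List Int) → Bool
  | [] => expected.isSome
  | x :: rest =>
    match expected with
    | none => isMatrixAltGo (some (x.length : Int)) rest
    | some e => if (x.length : Int) ≠ e then false else isMatrixAltGo (some e) rest

def isMatrix_alt (A : List (List Int)) : Bool := isMatrixAltGo none A

-- ===== PRECONDITION & SPEC =====
def Spec_isMatrix (A : List (List Int)) (out : Bool) : Prop := out = isMatrix_alt A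
instance (A : List (List Int)) (out : Bool) : Decidable (Spec_isMatrix A out) := by unfold Spec_isMatrix; infer_instance

-- ===== CLAIM (what is proved, stated in full; the proofs are below) =====
def Claim_equal_isMatrix : Prop := ∀ (A : List (List Int)), Dom_isMatrix A → Spec_isMatrix A (isMatrix A)

-- ===== LEMMAS AND PROOFS =====

lemma foldl_add_length_mono (ls : List Int) : ∀ (s : PySem.Set Int),
    s.length ≤ (List.foldl PySem.Set.add s ls).length := by
  induction ls with
  | nil => intro s; simp
  | cons v t ih =>
    intro s
    have h := ih (PySem.Set.add s v)
    have : s.length ≤ (PySem.Set.add s v).length := by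
      simp [PySem.Set.add]; split <;> simp
    simpa [List.foldl] using le_trans this h

lemma foldl_add_singleton_length_one (ls : List Int) : ∀ (e : Int),
    ((List.foldl PySem.Set.add [e] ls).length = 1 ↔ ∀ v ∈ ls, v = e) := by
  induction ls with
  | nil => intro e; simp
  | cons v t ih =>
    intro e
    by_cases hv : v = e
    · subst hv
      simpa [List.foldl, PySem.Set.add, PySem.Set.contains] using ih v
    · have hadd : PySem.Set.add [e] v = [e, v] := by
        simp [PySem.Set.add, PySem.Set.contains, hv]
      have hmono := foldl_add_length_mono t ([e, v] : PySem.Set Int)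
      constructor
      · intro h
        exfalso
        rw [List.foldl, hadd] at h
        have h2 : (2:Nat) ≤ (List.foldl PySem.Set.add [e, v] t).length := by simpa using hmono
        omega
      · intro h
        exact absurd (h v (by simp)) hv

lemma go_some_true (rest : List (List Int)) : ∀ (e : Int),
    isMatrixAltGo (some e) rest = true ↔ ∀ y ∈ rest, (y.length : Int) = e := by
  induction rest with
  | nil => intro e; simp [isMatrixAltGo]
  | cons x t ih =>
    intro e
    by_cases hx : (x.length : Int) = e
    · simp [isMatrixAltGo, hx, ih e]
    · simp [isMatrixAltGo, hx]

-- ===== VERDICT (by name: the statement is the Claim_ definition above) =====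
theorem isMatrix_spec : Claim_equal_isMatrix := by
  intro A _
  unfold Spec_isMatrix
  cases A with
  | nil => decide
  | cons x rest =>
    unfold isMatrix isMatrix_alt isMatrixAltGo
    simp only [List.map, PySem.Set.ofList_eq_foldl, List.foldl]
    have hA := foldl_add_singleton_length_one (rest.map (fun y => (y.length : Int))) (x.length : Int)
    have hB := go_some_true rest (x.length : Int)
    have hset : PySem.Set.add ([] : PySem.Set Int) (x.length : Int) = [(x.length : Int)] := by
      simp [PySem.Set.add, PySem.Set.contains]
    simp only [hset]
    by_cases h : ∀ y ∈ rest, (y.length : Int) = (x.length : Int)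
    · have h1 : (List.foldl PySem.Set.add [(x.length : Int)] (rest.map (fun y => (y.length : Int)))).length = 1 := by
        rw [hA]; intro v hv; simp at hv; obtain ⟨y, hy, rfl⟩ := hv; exact h y hy
      have h2 : isMatrixAltGo (some (x.length : Int)) rest = true := hB.mpr h
      simp [h1, h2]
    · have h1 : ¬ (List.foldl PySem.Set.add [(x.length : Int)] (rest.map (fun y => (y.length : Int)))).length = 1 := by
        rw [hA]; intro hc; apply h; intro y hy; exact hc _ (by simp; exact ⟨y, hy, rfl⟩)
      have h2 : ¬ isMatrixAltGo (some (x.length : Int)) rest = true := by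
        rw [hB]; exact h
      simp [h1, h2]
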